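-- pv_equiv track=rewrite | github.com/GreenwichandBarrow/Sapling | scripts/validate_conference_discovery_integrity.py | _match_snapshot_to_live
-- ===== SOURCE A (Python) =====
-- COL_D_NAME = 3
--
-- COL_M_URL = 12
--
-- def is_header_row(row: list[str]) -> bool:
--     """A week-of header is a single-cell row (col A populated, all others empty)."""
--     if not row:
--         return False
--     if not (row[0] and row[0].strip()):
--         return False
--     return all((not c) or (not c.strip()) for c in row[1:])
--
-- def event_url_key(row: list[str]) -> str | None:
--     """Normalized URL for indexing (col M). None if missing."""
--     if len(row) > COL_M_URL and row[COL_M_URL] and row[COL_M_URL].strip():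
--         return row[COL_M_URL].strip().rstrip("/").lower()
--     return None
--
-- def event_name_key(row: list[str]) -> str | None:
--     """Normalized name for indexing (col D). None if missing."""
--     if len(row) > COL_D_NAME and row[COL_D_NAME] and row[COL_D_NAME].strip():
--         return row[COL_D_NAME].strip().lower()
--     return None
--
-- def _match_snapshot_to_live(
--     snapshot_rows: list[list[str]], live_rows: list[list[str]]
-- ) -> tuple[dict, list[int]]:
--     """Build snap_idx → (live_idx, live_row) mapping using two-pass matching.
--
--     Pass 1: composite (url, name) match. Unique key, robust to duplicate
--     URLs (e.g., ACG chapter directory pages reused across events).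
--
--     Pass 2: URL-only match using a per-URL pool. Snapshot rows that share
--     a URL with multiple live rows get matched in document order (Nth
--     snapshot row → Nth live row). Handles the case where a name was edited
--     but URL stayed stable.
--
--     Pass 3: Name-only match. Catches the case where URL was added or
--     changed but name remained recognizable.
--
--     Returns (match_map, unmatched_snap_indices).
--     """
--     snap_events = [
--         (i, r) for i, r in enumerate(snapshot_rows) if not is_header_row(r)
--     ]
--     live_events = [
--         (i, r) for i, r in enumerate(live_rows) if not is_header_row(r)
--     ]
--
--     consumed_live: set[int] = set()
--     match_map: dict[int, tuple[int, list[str]]] = {}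
--
--     # Pass 1: composite (url, name)
--     for snap_i, snap_row in snap_events:
--         sk = (event_url_key(snap_row), event_name_key(snap_row))
--         if sk == (None, None):
--             continue
--         for live_i, live_row in live_events:
--             if live_i in consumed_live:
--                 continue
--             lk = (event_url_key(live_row), event_name_key(live_row))
--             if sk == lk:
--                 match_map[snap_i] = (live_i, live_row)
--                 consumed_live.add(live_i)
--                 break
--
--     # Pass 2: URL-only, document-order pool draw
--     for snap_i, snap_row in snap_events:
--         if snap_i in match_map:
--             continue
--         su = event_url_key(snap_row)
--         if su is None:
--             continue
--         for live_i, live_row in live_events: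
--             if live_i in consumed_live:
--                 continue
--             if event_url_key(live_row) == su:
--                 match_map[snap_i] = (live_i, live_row)
--                 consumed_live.add(live_i)
--                 break
--
--     # Pass 3: Name-only
--     for snap_i, snap_row in snap_events:
--         if snap_i in match_map:
--             continue
--         sn = event_name_key(snap_row)
--         if sn is None:
--             continue
--         for live_i, live_row in live_events:
--             if live_i in consumed_live:
--                 continue
--             if event_name_key(live_row) == sn:
--                 match_map[snap_i] = (live_i, live_row)
--                 consumed_live.add(live_i)
--                 break
--
--     unmatched = [snap_i for snap_i, _ in snap_events if snap_i not in match_map]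
--     return match_map, unmatched
-- ===== SOURCE B (Python) =====
-- COL_D_NAME = 3
--
-- COL_M_URL = 12
--
-- def is_header_row(row: list[str]) -> bool:
--     if not row:
--         return False
--     if not (row[0] and row[0].strip()):
--         return False
--     return all((not c) or (not c.strip()) for c in row[1:])
--
-- def event_url_key(row: list[str]) -> str | None:
--     if len(row) > COL_M_URL and row[COL_M_URL] and row[COL_M_URL].strip():
--         return row[COL_M_URL].strip().rstrip("/").lower()
--     return None
--
-- def event_name_key(row: list[str]) -> str | None:
--     if len(row) > COL_D_NAME and row[COL_D_NAME] and row[COL_D_NAME].strip():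
--         return row[COL_D_NAME].strip().lower()
--     return None
--
-- def _match_snapshot_to_live(snapshot_rows, live_rows):
--     """Pool-indexed matching: live rows are bucketed once per key kind; each
--     snapshot row draws the leftmost not-yet-consumed live row of its key."""
--     snap_events = [(i, r) for i, r in enumerate(snapshot_rows) if not is_header_row(r)]
--     live_events = [(i, r) for i, r in enumerate(live_rows) if not is_header_row(r)]
--
--     def build_pool(key_fn):
--         pool = {}
--         for e in live_events:
--             pool.setdefault(key_fn(e[1]), []).append(e)
--         return pool
--
--     comp_pool = build_pool(lambda r: (event_url_key(r), event_name_key(r)))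
--     url_pool = build_pool(event_url_key)
--     name_pool = build_pool(event_name_key)
--
--     consumed = set()
--     match_map = {}
--
--     def run_pass(pool, snap_key, check_matched):
--         for snap_i, snap_row in snap_events:
--             if check_matched and snap_i in match_map:
--                 continue
--             sk = snap_key(snap_row)
--             if sk is None:
--                 continue
--             hit = next((e for e in pool.get(sk, []) if e[0] not in consumed), None)
--             if hit is not None:
--                 match_map[snap_i] = hit
--                 consumed.add(hit[0])
--
--     def comp_snap_key(r):
--         k = (event_url_key(r), event_name_key(r))
--         return None if k == (None, None) else k
--
--     run_pass(comp_pool, comp_snap_key, False)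
--     run_pass(url_pool, event_url_key, True)
--     run_pass(name_pool, event_name_key, True)
--
--     unmatched = [snap_i for snap_i, _ in snap_events if snap_i not in match_map]
--     return match_map, unmatched
-- ===== Notes on version B (the rewrite author's own statement) =====
-- stated objective: faster
-- what changed: B builds per-key pools (dicts mapping composite/url/name keys to live rows) once, so each snapshot row scans only its own key's pool for the leftmost unconsumed live row instead of rescanning the whole live list in every pass.
import Mathlib
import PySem

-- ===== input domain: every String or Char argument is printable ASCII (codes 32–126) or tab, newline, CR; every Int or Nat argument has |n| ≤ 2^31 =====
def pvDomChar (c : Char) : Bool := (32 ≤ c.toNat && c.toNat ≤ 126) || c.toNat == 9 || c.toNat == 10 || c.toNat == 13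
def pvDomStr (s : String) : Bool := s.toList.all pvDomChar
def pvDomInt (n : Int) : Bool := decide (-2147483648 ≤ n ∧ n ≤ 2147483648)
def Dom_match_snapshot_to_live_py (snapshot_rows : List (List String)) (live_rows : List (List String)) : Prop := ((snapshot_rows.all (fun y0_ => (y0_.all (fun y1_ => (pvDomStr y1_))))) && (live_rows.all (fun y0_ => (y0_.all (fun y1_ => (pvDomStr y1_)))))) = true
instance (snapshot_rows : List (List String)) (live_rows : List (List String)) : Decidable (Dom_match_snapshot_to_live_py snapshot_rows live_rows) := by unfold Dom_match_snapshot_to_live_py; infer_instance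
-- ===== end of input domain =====

-- B replaces A's per-snapshot-row scans over ALL live rows by per-key pools (dicts of
-- live rows, built once) from which each snapshot row draws the leftmost unconsumed entry.

-- ===== shared module helpers (is_header_row / event_url_key / event_name_key) =====
def isHeaderRowPy : List String → Bool
  | [] => false
  | c0 :: rest =>
    if !(c0 != "" && PySem.Str.strip c0 != "") then false
    else rest.all (fun c => c == "" || PySem.Str.strip c == "")

-- exact hand port of s.rstrip("/") (PySem has no chars-argument rstrip): drop trailing '/'
def pyRstripSlash (s : String) : String :=
  String.ofList ((s.toList.reverse.dropWhile (fun ch => ch == '/')).reverse)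

def eventUrlKeyPy (row : List String) : Option String :=
  if 12 < row.length then
    let c := PySem.List.pyGetD row 12 ""
    if c != "" && PySem.Str.strip c != "" then
      some (PySem.Str.lower (pyRstripSlash (PySem.Str.strip c)))
    else none
  else none

def eventNameKeyPy (row : List String) : Option String :=
  if 3 < row.length then
    let c := PySem.List.pyGetD row 3 ""
    if c != "" && PySem.Str.strip c != "" then
      some (PySem.Str.lower (PySem.Str.strip c))
    else none
  else none

-- [(i, r) for i, r in enumerate(rows) if not is_header_row(r)]
def pvEventsPy (rows : List (List String)) : List (Int × List String) :=
  (PySem.List.enumerate rows).filter (fun e => !isHeaderRowPy e.2)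

def pvCompKey (r : List String) : Option String × Option String :=
  (eventUrlKeyPy r, eventNameKeyPy r)

-- snapshot-side key of each pass; `none` = the pass's `continue`
def pvCompSnapKey (r : List String) : Option (Option String × Option String) :=
  if pvCompKey r = (none, none) then none else some (pvCompKey r)

def pvUrlSnapKey (r : List String) : Option (Option String) := (eventUrlKeyPy r).map some

def pvNameSnapKey (r : List String) : Option (Option String) := (eventNameKeyPy r).map some

-- final (match_map, unmatched) assembly, identical in both sources
def pvFinish (snap_events : List (Int × List String))
    (st : PySem.Dict Int (Int × List String) × PySem.Set Int) :
    (List (Int × Int × List String)) × List Int :=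
  (st.1.items, (snap_events.filter (fun se => !st.1.contains se.1)).map (·.1))

-- ===== PORT A =====
-- A's inner `for live_i, live_row in live_events: … continue … break` scan
def pvFindLive {κ : Type} [BEq κ] (cons : PySem.Set Int) (liveKey : List String → κ) (sk : κ) :
    List (Int × List String) → Option (Int × List String)
  | [] => none
  | (li, lr) :: rest =>
    if PySem.Set.contains cons li then pvFindLive cons liveKey sk rest
    else if liveKey lr == sk then some (li, lr)
    else pvFindLive cons liveKey sk rest

-- one of A's three passes: state = (match_map, consumed)
def pvPassA {κ : Type} [BEq κ] (live_events : List (Int × List String))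
    (liveKey : List String → κ) (snapKey : List String → Option κ) (checkMatched : Bool)
    (snap_events : List (Int × List String))
    (st : PySem.Dict Int (Int × List String) × PySem.Set Int) :
    PySem.Dict Int (Int × List String) × PySem.Set Int :=
  snap_events.foldl (fun st se =>
    if checkMatched && st.1.contains se.1 then st
    else
      match snapKey se.2 with
      | none => st
      | some sk =>
        match pvFindLive st.2 liveKey sk live_events with
        | none => st
        | some hit => (st.1.insert se.1 hit, PySem.Set.add st.2 hit.1)) st

def match_snapshot_to_live_py (snapshot_rows : List (List String)) (live_rows : List (List String)) : (List (Int × Int × List String)) × List Int :=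
  let snap_events := pvEventsPy snapshot_rows
  let live_events := pvEventsPy live_rows
  pvFinish snap_events
    (pvPassA live_events eventNameKeyPy pvNameSnapKey true snap_events
      (pvPassA live_events eventUrlKeyPy pvUrlSnapKey true snap_events
        (pvPassA live_events pvCompKey pvCompSnapKey false snap_events
          (PySem.Dict.empty, PySem.Set.empty))))

-- ===== PORT B =====
-- pool.setdefault(key_fn(e[1]), []).append(e), i.e. pool[k] = pool.get(k, []) + [e]
def pvBuildPool {κ : Type} [BEq κ] (liveKey : List String → κ)
    (live_events : List (Int × List String)) : PySem.Dict κ (List (Int × List String)) :=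
  live_events.foldl (fun d e => d.modify (liveKey e.2) [] (· ++ [e])) PySem.Dict.empty

-- B's run_pass: draw the leftmost unconsumed entry of pool[sk]
def pvPassB {κ : Type} [BEq κ] (pool : PySem.Dict κ (List (Int × List String)))
    (snapKey : List String → Option κ) (checkMatched : Bool)
    (snap_events : List (Int × List String))
    (st : PySem.Dict Int (Int × List String) × PySem.Set Int) :
    PySem.Dict Int (Int × List String) × PySem.Set Int :=
  snap_events.foldl (fun st se =>
    if checkMatched && st.1.contains se.1 then st
    else
      match snapKey se.2 with
      | none => st
      | some sk =>
        match (pool.getD sk []).find? (fun e => !(PySem.Set.contains st.2 e.1)) with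
        | none => st
        | some hit => (st.1.insert se.1 hit, PySem.Set.add st.2 hit.1)) st

def match_snapshot_to_live_py_alt (snapshot_rows : List (List String)) (live_rows : List (List String)) : (List (Int × Int × List String)) × List Int :=
  let snap_events := pvEventsPy snapshot_rows
  let live_events := pvEventsPy live_rows
  let comp_pool := pvBuildPool pvCompKey live_events
  let url_pool := pvBuildPool eventUrlKeyPy live_events
  let name_pool := pvBuildPool eventNameKeyPy live_events
  pvFinish snap_events
    (pvPassB name_pool pvNameSnapKey true snap_events
      (pvPassB url_pool pvUrlSnapKey true snap_events
        (pvPassB comp_pool pvCompSnapKey false snap_events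
          (PySem.Dict.empty, PySem.Set.empty))))

-- ===== PRECONDITION & SPEC =====
def Spec_match_snapshot_to_live_py (snapshot_rows : List (List String)) (live_rows : List (List String)) (out : (List (Int × Int × List String)) × List Int) : Prop := out = match_snapshot_to_live_py_alt snapshot_rows live_rows
instance (snapshot_rows : List (List String)) (live_rows : List (List String)) (out : (List (Int × Int × List String)) × List Int) : Decidable (Spec_match_snapshot_to_live_py snapshot_rows live_rows out) := by unfold Spec_match_snapshot_to_live_py; infer_instance

-- ===== CLAIM (what is proved, stated in full; the proofs are below) =====
def Claim_equal_match_snapshot_to_live_py : Prop := ∀ (snapshot_rows : List (List String)) (live_rows : List (List String)), Dom_match_snapshot_to_live_py snapshot_rows live_rows → Spec_match_snapshot_to_live_py snapshot_rows live_rows (match_snapshot_to_live_py snapshot_rows live_rows)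

-- ===== LEMMAS AND PROOFS =====

-- A's scan = first unconsumed element of the key-filtered live list
theorem pvFindLive_eq {κ : Type} [BEq κ] (cons : PySem.Set Int) (liveKey : List String → κ)
    (sk : κ) : ∀ les : List (Int × List String),
    pvFindLive cons liveKey sk les
      = (les.filter (fun e => liveKey e.2 == sk)).find? (fun e => !(PySem.Set.contains cons e.1))
  | [] => rfl
  | (li, lr) :: rest => by
    by_cases h1 : li ∈ cons <;> cases h2 : liveKey lr == sk <;>
      simp [pvFindLive, h1, h2, pvFindLive_eq cons liveKey sk rest,
        PySem.Set.contains_eq_listContains]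

-- the pool at key sk IS the key-filtered live list
theorem pvBuildPool_getD {κ : Type} [BEq κ] [LawfulBEq κ] (liveKey : List String → κ)
    (les : List (Int × List String)) (sk : κ) :
    (pvBuildPool liveKey les).getD sk [] = les.filter (fun e => liveKey e.2 == sk) := by
  unfold pvBuildPool
  calc (les.foldl (fun d e => d.modify (liveKey e.2) [] (· ++ [e])) PySem.Dict.empty).getD sk []
      = ((les.map (fun e => (liveKey e.2, e))).foldl
          (fun (d : PySem.Dict κ (List (Int × List String))) p => d.modify p.1 [] (· ++ [p.2]))
          PySem.Dict.empty).getD sk [] := by rw [List.foldl_map]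
    _ = les.filter (fun e => liveKey e.2 == sk) := by
          rw [PySem.Dict.getD_foldl_modify_append]
          simp [List.filter_map, List.map_map, Function.comp_def]

-- each of A's passes equals B's pass over the corresponding pool
theorem pvPass_eq {κ : Type} [BEq κ] [LawfulBEq κ] (live_events : List (Int × List String))
    (liveKey : List String → κ) (snapKey : List String → Option κ) (checkMatched : Bool)
    (snap_events : List (Int × List String))
    (st : PySem.Dict Int (Int × List String) × PySem.Set Int) :
    pvPassA live_events liveKey snapKey checkMatched snap_events st
      = pvPassB (pvBuildPool liveKey live_events) snapKey checkMatched snap_events st := by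
  unfold pvPassA pvPassB
  apply PySem.List.foldl_congr_mem
  intro acc se _
  simp only [pvFindLive_eq, pvBuildPool_getD]

-- ===== VERDICT (by name: the statement is the Claim_ definition above) =====
theorem match_snapshot_to_live_py_spec : Claim_equal_match_snapshot_to_live_py := by
  intro snapshot_rows live_rows _
  unfold Spec_match_snapshot_to_live_py
  simp only [match_snapshot_to_live_py, match_snapshot_to_live_py_alt, pvPass_eq]
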